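-- pv_equiv track=rewrite | github.com/yodakeisuke/ralph-wiggum-aot | skills/state-contract/scripts/update_atom.py | update_atom_status
-- ===== SOURCE A (Python) =====
-- def update_atom_status(content: str, atom_id: str, new_status: str) -> tuple[str, bool]:
--     """Update atom status in content. Returns (new_content, success)."""
--     valid_statuses = ('pending', 'in_progress', 'resolved')
--     if new_status not in valid_statuses:
--         return content, False
--
--     # Find the atom and update its status
--     lines = content.split('\n')
--     result = []
--     found = False
--     in_target_atom = False
--
--     for i, line in enumerate(lines):
--         stripped = line.strip()
--
--         # Check if this is the start of our target atom
--         if stripped.startswith('- id:'):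
--             current_id = stripped.split(':', 1)[1].strip().strip('"').strip("'")
--             in_target_atom = (current_id == atom_id)
--
--         # If we're in the target atom and find status line
--         if in_target_atom and stripped.startswith('status:'):
--             # Preserve indentation
--             indent = len(line) - len(line.lstrip())
--             result.append(' ' * indent + f'status: {new_status}')
--             found = True
--             in_target_atom = False  # Done with this atom
--         else:
--             result.append(line)
--
--     return '\n'.join(result), found
-- ===== SOURCE B (Python) =====
-- def _copy_block(lines, i, new_status):
--     """Copy body lines of a matching block until its first status line (rewritten)
--     or the next id line; return (copied lines, resume index, rewrote?)."""
--     blk = []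
--     n = len(lines)
--     while i < n:
--         line = lines[i]
--         s = line.strip()
--         if s.startswith('- id:'):
--             return blk, i, False
--         if s.startswith('status:'):
--             indent = len(line) - len(line.lstrip())
--             blk.append(' ' * indent + 'status: ' + new_status)
--             return blk, i + 1, True
--         blk.append(line)
--         i += 1
--     return blk, n, False
--
--
-- def update_atom_status(content, atom_id, new_status):
--     """Update atom status in content. Returns (new_content, success)."""
--     if new_status not in ('pending', 'in_progress', 'resolved'):
--         return content, False
--     lines = content.split('\n')
--     out = []
--     found = False
--     i = 0
--     n = len(lines)
--     while i < n:
--         line = lines[i]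
--         s = line.strip()
--         if s.startswith('- id:') and s.split(':', 1)[1].strip().strip('"').strip("'") == atom_id:
--             out.append(line)
--             blk, i, f = _copy_block(lines, i + 1, new_status)
--             out.extend(blk)
--             found = found or f
--         else:
--             out.append(line)
--             i += 1
--     return '\n'.join(out), found
-- ===== Notes on version B (the rewrite author's own statement) =====
-- stated objective: alternative
-- what changed: A's single pass with an in_target_atom flag is replaced by a two-level block walk: an outer scan over lines that, on a '- id:' line whose parsed id matches, delegates the block body to a helper that copies lines and rewrites the block's first 'status:' line, resuming at the next id line.
import Mathlib
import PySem

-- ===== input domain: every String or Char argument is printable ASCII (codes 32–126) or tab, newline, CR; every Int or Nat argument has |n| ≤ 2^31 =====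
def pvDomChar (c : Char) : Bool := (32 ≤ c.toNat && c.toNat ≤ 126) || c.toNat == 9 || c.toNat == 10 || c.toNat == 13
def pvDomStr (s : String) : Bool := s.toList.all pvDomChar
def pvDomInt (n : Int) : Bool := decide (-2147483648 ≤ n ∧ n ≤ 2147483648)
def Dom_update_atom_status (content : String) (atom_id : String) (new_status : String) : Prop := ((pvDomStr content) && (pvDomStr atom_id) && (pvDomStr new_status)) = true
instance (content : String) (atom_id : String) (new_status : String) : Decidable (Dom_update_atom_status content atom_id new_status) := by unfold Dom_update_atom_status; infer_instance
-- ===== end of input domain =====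

-- B replaces A's per-line state machine (in_target_atom flag) by a two-level block walk:
-- an outer scan that, on a matching '- id:' line, hands the block body to a helper that
-- rewrites the block's first 'status:' line; objective: alternative decomposition, same cost.
-- Both ports share the small expression-level helpers both Pythons contain verbatim
-- (strip/startswith/id parsing/status-line rewriting).

-- ===== SHARED EXPRESSION HELPERS (identical sub-expressions of both Pythons) =====

-- stripped.split(':', 1)[1].strip().strip('"').strip("'")
def pvParseId (s : List Char) : List Char :=
  PySem.Chars.stripChars
    (PySem.Chars.stripChars
      (PySem.Chars.strip ((PySem.Chars.splitOnMax s [':'] 1).getD 1 []))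
      ['"'])
    ['\'']

-- ' ' * (len(line) - len(line.lstrip())) + 'status: ' + new_status
def pvRewriteStatus (line : List Char) (new_status : List Char) : List Char :=
  List.replicate (line.length - (PySem.Chars.lstrip line).length) ' '
    ++ "status: ".toList ++ new_status

-- new_status in ('pending', 'in_progress', 'resolved')
def pvValid (new_status : String) : Bool :=
  new_status == "pending" || new_status == "in_progress" || new_status == "resolved"

-- ===== PORT A =====

-- A's for-loop: state = (emitted lines, found, in_target_atom); found is the
-- disjunction of the per-step rewrite flags (it is only ever set to true).
def pvLoopA (atom_id new_status : List Char) :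
    List (List Char) → Bool → (List (List Char) × Bool)
  | [], _ => ([], false)
  | line :: rest, inT =>
    let s := PySem.Chars.strip line
    let inT' := if PySem.Chars.startswith s "- id:".toList
                then pvParseId s == atom_id else inT
    if inT' && PySem.Chars.startswith s "status:".toList then
      let r := pvLoopA atom_id new_status rest false
      (pvRewriteStatus line new_status :: r.1, true)
    else
      let r := pvLoopA atom_id new_status rest inT'
      (line :: r.1, r.2)

def update_atom_status (content : String) (atom_id : String) (new_status : String) : String × Bool :=
  if pvValid new_status then
    let lines := PySem.Chars.splitOn content.toList ['\n']
    let r := pvLoopA atom_id.toList new_status.toList lines false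
    (String.ofList (PySem.Chars.join ['\n'] r.1), r.2)
  else (content, false)

-- ===== PORT B =====

-- _copy_block: copy body lines of a matching block until its first status line
-- (rewritten) or the next id line; returns (copied lines, remaining lines, rewrote?).
def pvCopyBlock (new_status : List Char) :
    List (List Char) → (List (List Char) × List (List Char) × Bool)
  | [] => ([], [], false)
  | line :: rest =>
    let s := PySem.Chars.strip line
    if PySem.Chars.startswith s "- id:".toList then ([], line :: rest, false)
    else if PySem.Chars.startswith s "status:".toList then
      ([pvRewriteStatus line new_status], rest, true)
    else
      let r := pvCopyBlock new_status rest
      (line :: r.1, r.2.1, r.2.2)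

theorem pvCopyBlock_rest_le (new_status : List Char) (ls : List (List Char)) :
    (pvCopyBlock new_status ls).2.1.length ≤ ls.length := by
  induction ls with
  | nil => simp [pvCopyBlock]
  | cons l t ih =>
    simp only [pvCopyBlock]
    split_ifs <;> simp
    omega

-- outer while-loop of B
def pvGoOut (atom_id new_status : List Char) :
    List (List Char) → (List (List Char) × Bool)
  | [] => ([], false)
  | line :: rest =>
    let s := PySem.Chars.strip line
    if PySem.Chars.startswith s "- id:".toList && pvParseId s == atom_id then
      let b := pvCopyBlock new_status rest
      let t := pvGoOut atom_id new_status b.2.1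
      (line :: (b.1 ++ t.1), b.2.2 || t.2)
    else
      let t := pvGoOut atom_id new_status rest
      (line :: t.1, t.2)
termination_by ls => ls.length
decreasing_by
  · exact Nat.lt_succ_of_le (pvCopyBlock_rest_le _ _)
  · simp

def update_atom_status_alt (content : String) (atom_id : String) (new_status : String) : String × Bool :=
  if pvValid new_status then
    let lines := PySem.Chars.splitOn content.toList ['\n']
    let r := pvGoOut atom_id.toList new_status.toList lines
    (String.ofList (PySem.Chars.join ['\n'] r.1), r.2)
  else (content, false)

-- ===== PRECONDITION & SPEC =====
def Spec_update_atom_status (content : String) (atom_id : String) (new_status : String) (out : String × Bool) : Prop := out = update_atom_status_alt content atom_id new_status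
instance (content : String) (atom_id : String) (new_status : String) (out : String × Bool) : Decidable (Spec_update_atom_status content atom_id new_status out) := by unfold Spec_update_atom_status; infer_instance

-- ===== CLAIM (what is proved, stated in full; the proofs are below) =====
def Claim_equal_update_atom_status : Prop := ∀ (content : String) (atom_id : String) (new_status : String), Dom_update_atom_status content atom_id new_status → Spec_update_atom_status content atom_id new_status (update_atom_status content atom_id new_status)

-- ===== LEMMAS AND PROOFS =====

-- a stripped line cannot start with both '- id:' and 'status:'
theorem pv_id_not_status (s : List Char)
    (h : PySem.Chars.startswith s ['-', ' ', 'i', 'd', ':'] = true) :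
    PySem.Chars.startswith s ['s', 't', 'a', 't', 'u', 's', ':'] = false := by
  rw [PySem.Chars.startswith_iff] at h
  by_contra hc
  rw [Bool.not_eq_false, PySem.Chars.startswith_iff] at hc
  obtain ⟨t1, h1⟩ := h
  obtain ⟨t2, h2⟩ := hc
  rw [← h2] at h1
  simp [List.cons.injEq] at h1

-- main invariant: A's state machine agrees with B's block walk, for both values
-- of in_target_atom
theorem pv_main (atom_id new_status : List Char) (ls : List (List Char)) :
    pvLoopA atom_id new_status ls false = pvGoOut atom_id new_status ls ∧
    pvLoopA atom_id new_status ls true =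
      (let b := pvCopyBlock new_status ls
       let t := pvGoOut atom_id new_status b.2.1
       (b.1 ++ t.1, b.2.2 || t.2)) := by
  induction ls with
  | nil => simp [pvLoopA, pvGoOut, pvCopyBlock]
  | cons l t ih =>
    by_cases hid : PySem.Chars.startswith (PySem.Chars.strip l) ['-', ' ', 'i', 'd', ':'] = true
    · have hns := pv_id_not_status _ hid
      have h2 : pvLoopA atom_id new_status (l :: t) true =
          pvLoopA atom_id new_status (l :: t) false := by
        simp [pvLoopA, hid, hns]
      by_cases hm : pvParseId (PySem.Chars.strip l) == atom_id
      · have h1 : pvLoopA atom_id new_status (l :: t) false =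
            pvGoOut atom_id new_status (l :: t) := by
          rw [pvGoOut]
          simp [pvLoopA, hid, hns, hm, ih.2]
        exact ⟨h1, by rw [h2, h1]; simp [pvCopyBlock, hid]⟩
      · have h1 : pvLoopA atom_id new_status (l :: t) false =
            pvGoOut atom_id new_status (l :: t) := by
          rw [pvGoOut]
          simp [pvLoopA, hid, hns, hm, ih.1]
        exact ⟨h1, by rw [h2, h1]; simp [pvCopyBlock, hid]⟩
    · rw [Bool.not_eq_true] at hid
      by_cases hst : PySem.Chars.startswith (PySem.Chars.strip l) ['s', 't', 'a', 't', 'u', 's', ':'] = true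
      · constructor
        · rw [pvGoOut]
          simp [pvLoopA, hid, hst, ih.1]
        · simp only [pvCopyBlock]
          simp [pvLoopA, hid, hst, ih.1]
      · rw [Bool.not_eq_true] at hst
        constructor
        · rw [pvGoOut]
          simp [pvLoopA, hid, hst, ih.1]
        · simp only [pvCopyBlock]
          simp [pvLoopA, hid, hst, ih.2]

-- ===== VERDICT (by name: the statement is the Claim_ definition above) =====
theorem update_atom_status_spec : Claim_equal_update_atom_status := by
  intro content atom_id new_status _
  unfold Spec_update_atom_status update_atom_status update_atom_status_alt
  by_cases hv : pvValid new_status = true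
  · simp only [hv, if_true]
    rw [(pv_main atom_id.toList new_status.toList
      (PySem.Chars.splitOn content.toList ['\n'])).1]
  · simp [hv]
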